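-- pv_equiv track=rewrite | github.com/colgate-cs-research/config-mining | history/spearman_xor_and_correlation.py | generate_XOR_matrix
-- ===== SOURCE A (Python) =====
-- def generate_XOR_matrix (matrix, output_matrix):
--   for i in range (len(matrix)):
--     line = matrix[i]
--     for j in range (len(line) - 1):
--       for k in range (j + 1, len(line)):
--         if (line[j] != line[k]):
--           output_matrix[j][k] += 1
--           output_matrix[k][j] += 1
--
--   return output_matrix
-- ===== SOURCE B (Python) =====
-- def generate_XOR_matrix(matrix, output_matrix):
--     # Sort rows by length, longest first; then for any pair j < k, the rows that
--     # contain column k are exactly a prefix of the rows that contain column j,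
--     # so each column pair is a single zip reduction over a column-major view.
--     rows = sorted(matrix, key=len, reverse=True)
--     n = len(rows[0]) if rows else 0
--     cols = [[row[j] for row in rows if j < len(row)] for j in range(n)]
--     for j in range(n - 1):
--         for k in range(j + 1, n):
--             cnt = sum(x != y for x, y in zip(cols[j], cols[k]))
--             if cnt:
--                 output_matrix[j][k] += cnt
--                 output_matrix[k][j] += cnt
--     return output_matrix
-- ===== Notes on version B (the rewrite author's own statement) =====
-- stated objective: alternative
-- what changed: B sorts rows longest-first and builds a column-major view (transpose) once, so each column pair's differing-row count becomes a single zip reduction applied once to output_matrix[j][k] and [k][j], instead of A's row-by-row triple loop of scattered +=1 increments; sorting makes the rows containing column k a prefix of those containing column j, which handles ragged rows.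
import Mathlib
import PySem

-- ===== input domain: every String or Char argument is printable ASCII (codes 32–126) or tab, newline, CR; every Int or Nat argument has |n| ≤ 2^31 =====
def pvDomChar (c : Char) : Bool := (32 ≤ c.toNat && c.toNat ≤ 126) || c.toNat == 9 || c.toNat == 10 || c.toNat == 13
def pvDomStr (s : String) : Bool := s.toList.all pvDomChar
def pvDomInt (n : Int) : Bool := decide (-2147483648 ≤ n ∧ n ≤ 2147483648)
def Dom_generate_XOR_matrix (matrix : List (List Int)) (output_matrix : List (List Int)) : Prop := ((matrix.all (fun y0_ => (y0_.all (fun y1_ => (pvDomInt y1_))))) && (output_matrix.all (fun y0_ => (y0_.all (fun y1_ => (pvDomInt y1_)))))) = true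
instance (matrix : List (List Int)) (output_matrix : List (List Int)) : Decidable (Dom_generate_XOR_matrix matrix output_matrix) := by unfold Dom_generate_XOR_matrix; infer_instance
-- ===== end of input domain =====

-- B sorts rows longest-first and builds a column-major view once, so each column
-- pair becomes a single zip reduction (alternative algorithm, same cost).
-- Both Pythons mutate output_matrix in place the same way; the equivalence proved
-- here is about the return value.

-- 'output_matrix[a][b] += d' (no-op when out of range; Pre_ keeps the Python in range)
def pvAddAt (om : List (List Int)) (a b : Nat) (d : Int) : List (List Int) :=
  om.modify a (fun row => row.modify b (fun v => v + d))

-- ===== PORT A =====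
def generate_XOR_matrix (matrix : List (List Int)) (output_matrix : List (List Int)) : List (List Int) :=
  matrix.foldl (fun om line =>
    (List.range (line.length - 1)).foldl (fun om j =>
      (List.range' (j + 1) (line.length - (j + 1))).foldl (fun om k =>
        if line.getD j 0 ≠ line.getD k 0 then
          pvAddAt (pvAddAt om j k 1) k j 1
        else om) om) om) output_matrix

-- ===== PORT B =====
-- rows = sorted(matrix, key=len, reverse=True)
def pvRowsB (matrix : List (List Int)) : List (List Int) :=
  PySem.List.sorted matrix (fun r => r.length) true

-- n = len(rows[0]) if rows else 0
def pvNB (matrix : List (List Int)) : Nat :=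
  match pvRowsB matrix with
  | [] => 0
  | r :: _ => r.length

-- cols = [[row[j] for row in rows if j < len(row)] for j in range(n)]
def pvColsB (matrix : List (List Int)) : List (List Int) :=
  (List.range (pvNB matrix)).map (fun j =>
    ((pvRowsB matrix).filter (fun row => decide (j < row.length))).map (fun row => row.getD j 0))

def generate_XOR_matrix_alt (matrix : List (List Int)) (output_matrix : List (List Int)) : List (List Int) :=
  (List.range (pvNB matrix - 1)).foldl (fun om j =>
    (List.range' (j + 1) (pvNB matrix - (j + 1))).foldl (fun om k =>
      let cnt := (((pvColsB matrix).getD j []).zip ((pvColsB matrix).getD k [])).countP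
        (fun p => decide (p.1 ≠ p.2))
      if cnt ≠ 0 then pvAddAt (pvAddAt om j k (cnt : Int)) k j (cnt : Int) else om) om) output_matrix

-- ===== PRECONDITION & SPEC =====
-- Pre_ excludes exactly the inputs on which the Python A raises IndexError: some row has a differing
-- pair (j,k) whose increment targets lie outside output_matrix.
def Pre_generate_XOR_matrix (matrix : List (List Int)) (output_matrix : List (List Int)) : Prop :=
  ∀ line ∈ matrix, ∀ k < line.length, ∀ j < k,
    line.getD j 0 ≠ line.getD k 0 →
      j < output_matrix.length ∧ k < output_matrix.length ∧
      k < (output_matrix.getD j []).length ∧ j < (output_matrix.getD k []).length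
instance (matrix : List (List Int)) (output_matrix : List (List Int)) : Decidable (Pre_generate_XOR_matrix matrix output_matrix) := by unfold Pre_generate_XOR_matrix; infer_instance

def pvWitness_generate_XOR_matrix : List (List Int) × List (List Int) := ([[1, 2], [0, 0]], [[5, 0], [0, -1]])

def Spec_generate_XOR_matrix (matrix : List (List Int)) (output_matrix : List (List Int)) (out : List (List Int)) : Prop := out = generate_XOR_matrix_alt matrix output_matrix
instance (matrix : List (List Int)) (output_matrix : List (List Int)) (out : List (List Int)) : Decidable (Spec_generate_XOR_matrix matrix output_matrix out) := by unfold Spec_generate_XOR_matrix; infer_instance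

-- ===== CLAIM (what is proved, stated in full; the proofs are below) =====
def Claim_equal_generate_XOR_matrix : Prop := ∀ (matrix : List (List Int)) (output_matrix : List (List Int)), Dom_generate_XOR_matrix matrix output_matrix → Pre_generate_XOR_matrix matrix output_matrix → Spec_generate_XOR_matrix matrix output_matrix (generate_XOR_matrix matrix output_matrix)

-- ===== LEMMAS AND PROOFS =====

-- the symmetric pair of increments A performs for one differing pair, with weight d
def pvG (om : List (List Int)) (j k : Nat) (d : Int) : List (List Int) := pvAddAt (pvAddAt om j k d) k j d

-- "row qualifies for pair (j,k)": row contains column k and differs there from column j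
def pvP (line : List Int) (j k : Nat) : Bool := decide (k < line.length ∧ line.getD j 0 ≠ line.getD k 0)

-- the guarded atomic operation both programs are composed of
def pvF (om : List (List Int)) (line : List Int) (j k : Nat) : List (List Int) :=
  if pvP line j k then pvG om j k 1 else om

-- flattened pair enumeration (j,k), j < k < n
def pvPairs (n : Nat) : List (Nat × Nat) :=
  (List.range (n - 1)).flatMap (fun j => (List.range' (j + 1) (n - (j + 1))).map (fun k => (j, k)))

-- the column of index j in B's column-major view
def pvColf (rows : List (List Int)) (j : Nat) : List Int :=
  (rows.filter (fun row => decide (j < row.length))).map (fun row => row.getD j 0)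

theorem pv_modify_modify_comm {α : Type} (l : List α) (i j : Nat) (f g : α → α)
    (h : ∀ x, f (g x) = g (f x)) : (l.modify i f).modify j g = (l.modify j g).modify i f := by
  apply List.ext_getElem
  · simp
  · intro n h1 h2
    by_cases hi : i = n <;> by_cases hj : j = n <;>
      simp [hi, hj, h]

theorem pvAddAt_comm (om : List (List Int)) (a b : Nat) (d : Int) (a' b' : Nat) (d' : Int) :
    pvAddAt (pvAddAt om a b d) a' b' d' = pvAddAt (pvAddAt om a' b' d') a b d := by
  unfold pvAddAt
  apply pv_modify_modify_comm
  intro row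
  apply pv_modify_modify_comm
  intro x
  ring

theorem pvAddAt_zero (om : List (List Int)) (a b : Nat) : pvAddAt om a b 0 = om := by
  unfold pvAddAt
  apply List.ext_getElem
  · simp
  · intro n h1 h2
    by_cases hi : a = n <;> simp [hi]
    apply List.ext_getElem
    · simp
    · intro m hm1 hm2
      by_cases hb : b = m <;> simp [hb]

theorem pvAddAt_add (om : List (List Int)) (a b : Nat) (x y : Int) :
    pvAddAt (pvAddAt om a b x) a b y = pvAddAt om a b (x + y) := by
  unfold pvAddAt
  apply List.ext_getElem
  · simp
  · intro n h1 h2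
    by_cases hi : a = n <;> simp [hi]
    apply List.ext_getElem
    · simp
    · intro m hm1 hm2
      by_cases hb : b = m <;> simp [hb]
      ring

theorem pvG_addAt_comm (om : List (List Int)) (a b : Nat) (e : Int) (j k : Nat) (d : Int) :
    pvG (pvAddAt om a b e) j k d = pvAddAt (pvG om j k d) a b e := by
  unfold pvG
  rw [pvAddAt_comm om a b e j k d, pvAddAt_comm (pvAddAt om j k d) a b e k j d]

theorem pvG_comm (om : List (List Int)) (j k : Nat) (d : Int) (j' k' : Nat) (d' : Int) :
    pvG (pvG om j k d) j' k' d' = pvG (pvG om j' k' d') j k d := by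
  show pvG (pvAddAt (pvAddAt om j k d) k j d) j' k' d' = _
  rw [pvG_addAt_comm, pvG_addAt_comm]
  rfl

theorem pvG_add (om : List (List Int)) (j k : Nat) (x y : Int) :
    pvG (pvG om j k x) j k y = pvG om j k (x + y) := by
  unfold pvG
  rw [pvAddAt_comm (pvAddAt om j k x) k j x j k y, pvAddAt_add om j k x y,
      pvAddAt_add (pvAddAt om j k (x + y)) k j x y]

theorem pvG_zero (om : List (List Int)) (j k : Nat) : pvG om j k 0 = om := by
  simp [pvG, pvAddAt_zero]

theorem pvF_comm (om : List (List Int)) (l : List Int) (j k : Nat) (l' : List Int) (j' k' : Nat) :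
    pvF (pvF om l j k) l' j' k' = pvF (pvF om l' j' k') l j k := by
  unfold pvF
  split_ifs <;> first | rfl | exact pvG_comm om j k 1 j' k' 1

theorem pv_op_past {M γ : Type} (op : M → M) (g : M → γ → M)
    (hg : ∀ m c, op (g m c) = g (op m) c) :
    ∀ (l : List γ) (m : M), l.foldl g (op m) = op (l.foldl g m) := by
  intro l
  induction l with
  | nil => intro m; rfl
  | cons c l ih =>
    intro m
    simp only [List.foldl_cons]
    rw [← hg, ih]

theorem pv_star {M β : Type} (E K : M → β → M)
    (hEK : ∀ m b b', E (K m b') b = K (E m b) b') :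
    ∀ (bs : List β) (m : M), bs.foldl E (bs.foldl K m) = bs.foldl (fun m b => E (K m b) b) m := by
  intro bs
  induction bs with
  | nil => intro m; rfl
  | cons b bs ih =>
    intro m
    simp only [List.foldl_cons]
    rw [← pv_op_past (fun m => E m b) K (fun m c => hEK m b c) bs (K m b)]
    exact ih (E (K m b) b)

theorem pv_interchange {M α β : Type} (f : M → α → β → M)
    (hc : ∀ m a b a' b', f (f m a b) a' b' = f (f m a' b') a b) :
    ∀ (as : List α) (bs : List β) (m : M),
      as.foldl (fun m a => bs.foldl (fun m b => f m a b) m) m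
        = bs.foldl (fun m b => as.foldl (fun m a => f m a b) m) m := by
  intro as
  induction as with
  | nil =>
    intro bs m
    induction bs generalizing m with
    | nil => rfl
    | cons b bs ih => exact ih m
  | cons a as ih =>
    intro bs m
    simp only [List.foldl_cons]
    rw [ih bs (bs.foldl (fun m b => f m a b) m)]
    exact pv_star (fun m b => as.foldl (fun m a => f m a b) m) (fun m b => f m a b)
      (fun m b b' => pv_op_past (fun m => f m a b') (fun m x => f m x b)
        (fun m c => hc m c b a b') as m) bs m

theorem pv_foldl_id {γ M : Type} (l : List γ) (g : M → γ → M)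
    (hg : ∀ m c, c ∈ l → g m c = m) : ∀ m, l.foldl g m = m := by
  induction l with
  | nil => intro m; rfl
  | cons c l ih =>
    intro m
    simp only [List.foldl_cons]
    rw [hg m c List.mem_cons_self]
    exact ih (fun m c hc => hg m c (List.mem_cons_of_mem _ hc)) m

theorem pv_rows_fold (j k : Nat) :
    ∀ (rows : List (List Int)) (om : List (List Int)),
      rows.foldl (fun om line => pvF om line j k) om
        = pvG om j k (rows.countP (fun row => pvP row j k) : Int) := by
  intro rows
  induction rows with
  | nil => intro om; simp [pvG_zero]
  | cons row rest ih =>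
    intro om
    simp only [List.foldl_cons, List.countP_cons]
    by_cases h : pvP row j k
    · rw [show pvF om row j k = pvG om j k 1 from by simp [pvF, h], ih, pvG_add]
      congr 1
      rw [if_pos h]
      push_cast
      ring
    · rw [show pvF om row j k = om from by simp [pvF, h], ih]
      congr 1
      simp [h]

-- A's per-row double loop, extended to the global pair list: out-of-row pairs are no-ops.
theorem pv_rowA_ext (n : Nat) (line : List Int) (h : line.length ≤ n) (om : List (List Int)) :
    (List.range (line.length - 1)).foldl (fun om j =>
        (List.range' (j + 1) (line.length - (j + 1))).foldl (fun om k =>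
          if line.getD j 0 ≠ line.getD k 0 then pvAddAt (pvAddAt om j k 1) k j 1 else om) om) om
      = (pvPairs n).foldl (fun om p => pvF om line p.1 p.2) om := by
  unfold pvPairs
  rw [List.foldl_flatMap]
  simp only [List.foldl_map]
  have hL : line.length - 1 ≤ n - 1 := by omega
  have hsplit : List.range (n - 1)
      = List.range (line.length - 1) ++ List.range' (line.length - 1) ((n - 1) - (line.length - 1)) := by
    have h2 := List.range'_append_1 (s := 0) (m := line.length - 1) (n := (n - 1) - (line.length - 1))
    simp only [Nat.zero_add] at h2
    rw [List.range_eq_range', List.range_eq_range', h2]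
    congr 1
    omega
  rw [hsplit, List.foldl_append]
  -- the appended tail is a no-op: there j ≥ line.length - 1, so every k ≥ line.length
  rw [pv_foldl_id (List.range' (line.length - 1) ((n - 1) - (line.length - 1)))
      _ (fun om j hj => by
        rcases List.mem_range'_1.mp hj with ⟨hj1, _⟩
        exact pv_foldl_id _ _ (fun om' k hk => by
          rcases List.mem_range'_1.mp hk with ⟨hk1, _⟩
          have : ¬ (k < line.length) := by omega
          simp [pvF, pvP, this]) om)]
  -- on the kept prefix the two inner loops agree
  apply PySem.List.foldl_congr_mem
  intro acc j hj
  have hjL : j < line.length - 1 := List.mem_range.mp hj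
  have hinner : List.range' (j + 1) (n - (j + 1))
      = List.range' (j + 1) (line.length - (j + 1)) ++ List.range' line.length (n - line.length) := by
    have h3 := List.range'_append_1 (s := j + 1) (m := line.length - (j + 1)) (n := n - line.length)
    rw [show (j + 1) + (line.length - (j + 1)) = line.length from by omega] at h3
    rw [h3]
    congr 1
    omega
  rw [hinner, List.foldl_append]
  rw [pv_foldl_id (List.range' line.length (n - line.length)) _ (fun om' k hk => by
    rcases List.mem_range'_1.mp hk with ⟨hk1, _⟩
    have : ¬ (k < line.length) := by omega
    simp [pvF, pvP, this])]
  apply PySem.List.foldl_congr_mem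
  intro acc' k hk
  rcases List.mem_range'_1.mp hk with ⟨hk1, hk2⟩
  have hkL : k < line.length := by omega
  simp only [pvF, pvP, pvG, hkL, true_and, decide_eq_true_eq]

-- every row length is bounded by the length of B's longest-first head
theorem pv_len_le_n (matrix : List (List Int)) (line : List Int) (h : line ∈ matrix) :
    line.length ≤ pvNB matrix := by
  unfold pvNB
  cases hc : pvRowsB matrix with
  | nil =>
    exfalso
    have hm : matrix = [] := (PySem.List.sorted_eq_nil_iff matrix (fun r => r.length) true).mp hc
    rw [hm] at h
    simp at h
  | cons m t =>
    exact PySem.List.key_head_sorted_rev_ge matrix (fun r => r.length) hc line h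

-- B's sorted rows have nonincreasing lengths
theorem pv_rowsB_pairwise (matrix : List (List Int)) :
    (pvRowsB matrix).Pairwise (fun a b => b.length ≤ a.length) :=
  PySem.List.sorted_pairwise_rev matrix (fun r => r.length)

-- longest-first sorting makes the rows containing column k a prefix of those containing column j
theorem pv_zip_cols (j k : Nat) (hjk : j ≤ k) :
    ∀ rows : List (List Int), rows.Pairwise (fun a b => b.length ≤ a.length) →
      (pvColf rows j).zip (pvColf rows k)
        = (rows.filter (fun r => decide (k < r.length))).map (fun r => (r.getD j 0, r.getD k 0)) := by
  intro rows
  induction rows with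
  | nil => intro _; rfl
  | cons r t ih =>
    intro hp
    rcases List.pairwise_cons.mp hp with ⟨h1, h2⟩
    by_cases hk : k < r.length
    · have hj : j < r.length := Nat.lt_of_le_of_lt hjk hk
      simp only [pvColf, List.filter_cons, hj, hk, decide_true, if_true, List.map_cons,
        List.zip_cons_cons]
      rw [show ((t.filter (fun row => decide (j < row.length))).map (fun row => row.getD j 0)).zip
          ((t.filter (fun row => decide (k < row.length))).map (fun row => row.getD k 0))
          = (pvColf t j).zip (pvColf t k) from rfl, ih h2]
    · have htk : t.filter (fun r => decide (k < r.length)) = [] := by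
        apply List.filter_eq_nil_iff.mpr
        intro b hb
        have := h1 b hb
        simp only [decide_eq_true_eq]
        omega
      have hck : pvColf (r :: t) k = [] := by
        simp [pvColf, hk, htk]
      rw [hck, List.zip_nil_right]
      simp [hk, htk]

theorem pv_getD_map_range {α : Type} (f : Nat → α) (n j : Nat) (h : j < n) (d : α) :
    ((List.range n).map f).getD j d = f j := by
  rw [List.getD_eq_getElem?_getD, List.getElem?_map, List.getElem?_range h]
  rfl

-- membership in the flattened pair list
theorem pv_mem_pvPairs (n : Nat) (p : Nat × Nat) (h : p ∈ pvPairs n) : p.1 < p.2 ∧ p.2 < n := by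
  unfold pvPairs at h
  rcases List.mem_flatMap.mp h with ⟨j, hj, hp⟩
  rcases List.mem_map.mp hp with ⟨k, hk, rfl⟩
  have h1 := List.mem_range.mp hj
  rcases List.mem_range'_1.mp hk with ⟨h2, h3⟩
  exact ⟨by omega, by omega⟩

-- B's per-pair zip count equals the number of rows of the ORIGINAL matrix qualifying for (j,k)
theorem pv_cnt_eq (matrix : List (List Int)) (j k : Nat) (hjk : j < k) (hk : k < pvNB matrix) :
    (((pvColsB matrix).getD j []).zip ((pvColsB matrix).getD k [])).countP
        (fun p => decide (p.1 ≠ p.2))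
      = matrix.countP (fun row => pvP row j k) := by
  have hj : j < pvNB matrix := by omega
  unfold pvColsB
  rw [pv_getD_map_range _ _ _ hj, pv_getD_map_range _ _ _ hk]
  rw [show (((pvRowsB matrix).filter (fun row => decide (j < row.length))).map
        (fun row => row.getD j 0)).zip
      (((pvRowsB matrix).filter (fun row => decide (k < row.length))).map
        (fun row => row.getD k 0))
      = (pvColf (pvRowsB matrix) j).zip (pvColf (pvRowsB matrix) k) from rfl]
  rw [pv_zip_cols j k (Nat.le_of_lt hjk) (pvRowsB matrix) (pv_rowsB_pairwise matrix)]
  rw [List.countP_map, List.countP_filter]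
  unfold pvRowsB
  rw [(PySem.List.sorted_perm matrix (fun r => r.length) true).countP_eq]
  apply List.countP_congr
  intro r _
  simp only [pvP, Function.comp]
  rw [Bool.and_comm]
  rw [show (decide (k < r.length) && decide (r.getD j 0 ≠ r.getD k 0)) = decide (k < r.length ∧ r.getD j 0 ≠ r.getD k 0) from by by_cases h1 : k < r.length <;> simp [h1]]

theorem pv_main (matrix : List (List Int)) (om : List (List Int)) :
    generate_XOR_matrix matrix om = generate_XOR_matrix_alt matrix om := by
  have hA : generate_XOR_matrix matrix om
      = List.foldl (fun om line => List.foldl (fun om p => pvF om line p.1 p.2) om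
          (pvPairs (pvNB matrix))) om matrix :=
    PySem.List.foldl_congr_mem matrix _ _ om (fun acc line hline =>
      pv_rowA_ext (pvNB matrix) line (pv_len_le_n matrix line hline) acc)
  have hB : generate_XOR_matrix_alt matrix om
      = (pvPairs (pvNB matrix)).foldl (fun om p =>
          let cnt := (((pvColsB matrix).getD p.1 []).zip ((pvColsB matrix).getD p.2 [])).countP
            (fun q => decide (q.1 ≠ q.2))
          if cnt ≠ 0 then pvAddAt (pvAddAt om p.1 p.2 (cnt : Int)) p.2 p.1 (cnt : Int) else om) om := by
    unfold generate_XOR_matrix_alt pvPairs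
    rw [List.foldl_flatMap]
    simp only [List.foldl_map]
  rw [hA, hB, pv_interchange (fun m line p => pvF m line p.1 p.2)
      (fun m l p l' p' => pvF_comm m l p.1 p.2 l' p'.1 p'.2) matrix (pvPairs (pvNB matrix)) om]
  apply PySem.List.foldl_congr_mem
  intro acc p hp
  rcases pv_mem_pvPairs _ p hp with ⟨hp12, hp2⟩
  rw [pv_rows_fold p.1 p.2 matrix acc]
  simp only [pv_cnt_eq matrix p.1 p.2 hp12 hp2]
  by_cases h : matrix.countP (fun row => pvP row p.1 p.2) = 0
  · simp [h, pvG_zero]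
  · simp [h, pvG]

-- ===== VERDICT (by name: the statement is the Claim_ definition above) =====
theorem generate_XOR_matrix_spec : Claim_equal_generate_XOR_matrix := by
  intro matrix output_matrix _ _
  unfold Spec_generate_XOR_matrix
  exact pv_main matrix output_matrix
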